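-- pv_equiv track=rewrite | github.com/Talalkassab/Review-Manager | frontend/backend/app/agents/customer_segmentation_agent.py | _identify_special_occasions
-- ===== SOURCE A (Python) =====
-- from typing import Dict, Any, List, Optional
--
-- def _identify_special_occasions(customer_data: Dict[str, Any]) -> List[str]:
--     """Identify special occasions for customer"""
--     occasions = []
--
--     # Check for birthday visits
--     visits = customer_data.get("visits", [])
--     for visit in visits:
--         if visit.get("occasion") == "birthday":
--             occasions.append("birthday")
--             break
--
--     # Check for anniversary visits
--     for visit in visits:
--         if visit.get("occasion") == "anniversary":
--             occasions.append("anniversary")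
--             break
--
--     # Check for holiday visits
--     for visit in visits:
--         if visit.get("occasion") in ["eid", "ramadan", "national_day"]:
--             if visit.get("occasion") not in occasions:
--                 occasions.append(visit.get("occasion"))
--
--     return occasions
-- ===== SOURCE B (Python) =====
-- from typing import Dict, Any, List
--
-- def _identify_special_occasions(customer_data: Dict[str, Any]) -> List[str]:
--     """Single pass over visits with maintained state instead of three scans."""
--     has_birthday = False
--     has_anniversary = False
--     holidays = []
--     for visit in customer_data.get("visits", []):
--         occ = visit.get("occasion")
--         if occ == "birthday":
--             has_birthday = True
--         elif occ == "anniversary":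
--             has_anniversary = True
--         elif occ in ("eid", "ramadan", "national_day") and occ not in holidays:
--             holidays.append(occ)
--     out = []
--     if has_birthday:
--         out.append("birthday")
--     if has_anniversary:
--         out.append("anniversary")
--     return out + holidays
-- ===== Notes on version B (the rewrite author's own statement) =====
-- stated objective: alternative
-- what changed: Replaced A's three sequential scans over the visit list (two early-exit searches plus a dedup scan) by one single pass that maintains has_birthday/has_anniversary flags and an ordered deduplicated holiday list, assembling the output afterwards in fixed order.
import Mathlib
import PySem

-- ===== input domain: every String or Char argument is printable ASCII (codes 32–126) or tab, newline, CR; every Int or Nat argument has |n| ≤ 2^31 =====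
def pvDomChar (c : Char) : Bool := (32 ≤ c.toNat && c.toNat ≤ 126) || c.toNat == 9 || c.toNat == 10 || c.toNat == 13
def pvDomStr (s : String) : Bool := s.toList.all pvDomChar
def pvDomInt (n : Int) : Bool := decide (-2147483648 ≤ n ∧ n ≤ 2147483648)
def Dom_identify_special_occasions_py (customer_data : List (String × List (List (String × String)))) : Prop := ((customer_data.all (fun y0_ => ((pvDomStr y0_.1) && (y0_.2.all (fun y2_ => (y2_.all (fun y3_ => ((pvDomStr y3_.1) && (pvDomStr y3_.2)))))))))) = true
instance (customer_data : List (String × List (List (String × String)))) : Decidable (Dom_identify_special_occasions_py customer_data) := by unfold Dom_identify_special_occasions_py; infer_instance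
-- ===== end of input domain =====

-- B replaces A's three sequential scans by one pass maintaining flags and an ordered dedup'd holiday list (objective: alternative decomposition, same cost).

-- shared dict primitives (assoc-list lookup, first match = Python dict.get)
def pvVisitGet? (visit : List (String × String)) (k : String) : Option String :=
  match visit with
  | [] => none
  | (k', v) :: rest => if k' == k then some v else pvVisitGet? rest k

def pvVisitsGetD (d : List (String × List (List (String × String)))) : List (List (String × String)) :=
  match d with
  | [] => []
  | (k, v) :: rest => if k == "visits" then v else pvVisitsGetD rest

-- ===== PORT A =====
-- first loop: search for a birthday visit, append once, break
def aLoop1 (visits : List (List (String × String))) (occasions : List String) : List String :=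
  match visits with
  | [] => occasions
  | v :: rest =>
    if pvVisitGet? v "occasion" == some "birthday" then occasions ++ ["birthday"]
    else aLoop1 rest occasions

-- second loop: search for an anniversary visit, append once, break
def aLoop2 (visits : List (List (String × String))) (occasions : List String) : List String :=
  match visits with
  | [] => occasions
  | v :: rest =>
    if pvVisitGet? v "occasion" == some "anniversary" then occasions ++ ["anniversary"]
    else aLoop2 rest occasions

-- third loop: append each holiday occasion not yet present
def aLoop3 (visits : List (List (String × String))) (occasions : List String) : List String :=
  match visits with
  | [] => occasions
  | v :: rest =>
    let occ := pvVisitGet? v "occasion"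
    let occasions' :=
      if occ == some "eid" || occ == some "ramadan" || occ == some "national_day" then
        match occ with
        | some s => if s ∈ occasions then occasions else occasions ++ [s]
        | none => occasions
      else occasions
    aLoop3 rest occasions'

def identify_special_occasions_py (customer_data : List (String × List (List (String × String)))) : List String :=
  let visits := pvVisitsGetD customer_data
  let occasions := aLoop1 visits []
  let occasions := aLoop2 visits occasions
  aLoop3 visits occasions

-- ===== PORT B =====
-- one pass: maintain has_birthday, has_anniversary, ordered dedup'd holidays
def bLoop (visits : List (List (String × String))) (hb ha : Bool) (holidays : List String) :
    Bool × Bool × List String :=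
  match visits with
  | [] => (hb, ha, holidays)
  | v :: rest =>
    let occ := pvVisitGet? v "occasion"
    if occ == some "birthday" then bLoop rest true ha holidays
    else if occ == some "anniversary" then bLoop rest hb true holidays
    else
      match occ with
      | some s =>
        if (s == "eid" || s == "ramadan" || s == "national_day") && !(holidays.contains s) then
          bLoop rest hb ha (holidays ++ [s])
        else bLoop rest hb ha holidays
      | none => bLoop rest hb ha holidays

def identify_special_occasions_py_alt (customer_data : List (String × List (List (String × String)))) : List String :=
  let r := bLoop (pvVisitsGetD customer_data) false false []
  (if r.1 then ["birthday"] else []) ++ (if r.2.1 then ["anniversary"] else []) ++ r.2.2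

-- ===== PRECONDITION & SPEC =====
def Spec_identify_special_occasions_py (customer_data : List (String × List (List (String × String)))) (out : List String) : Prop := out = identify_special_occasions_py_alt customer_data
instance (customer_data : List (String × List (List (String × String)))) (out : List String) : Decidable (Spec_identify_special_occasions_py customer_data out) := by unfold Spec_identify_special_occasions_py; infer_instance

-- ===== CLAIM (what is proved, stated in full; the proofs are below) =====
def Claim_equal_identify_special_occasions_py : Prop := ∀ (customer_data : List (String × List (List (String × String)))), Dom_identify_special_occasions_py customer_data → Spec_identify_special_occasions_py customer_data (identify_special_occasions_py customer_data)

-- ===== LEMMAS AND PROOFS =====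

-- canonical values of the three pieces of state
def hbF (visits : List (List (String × String))) : Bool :=
  visits.any (fun v => pvVisitGet? v "occasion" == some "birthday")
def haF (visits : List (List (String × String))) : Bool :=
  visits.any (fun v => pvVisitGet? v "occasion" == some "anniversary")
def holF (visits : List (List (String × String))) (hol : List String) : List String :=
  match visits with
  | [] => hol
  | v :: rest =>
    holF rest
      (match pvVisitGet? v "occasion" with
       | some s =>
         if (s == "eid" || s == "ramadan" || s == "national_day") && !(hol.contains s) then
           hol ++ [s]
         else hol
       | none => hol)

theorem aLoop1_eq (visits : List (List (String × String))) (occ : List String) :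
    aLoop1 visits occ = occ ++ (if hbF visits then ["birthday"] else []) := by
  induction visits with
  | nil => simp [aLoop1, hbF]
  | cons v rest ih =>
    simp only [aLoop1, hbF, List.any_cons]
    by_cases h : pvVisitGet? v "occasion" == some "birthday" <;> simp [h, ih, hbF]

theorem aLoop2_eq (visits : List (List (String × String))) (occ : List String) :
    aLoop2 visits occ = occ ++ (if haF visits then ["anniversary"] else []) := by
  induction visits with
  | nil => simp [aLoop2, haF]
  | cons v rest ih =>
    simp only [aLoop2, haF, List.any_cons]
    by_cases h : pvVisitGet? v "occasion" == some "anniversary" <;> simp [h, ih, haF]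

theorem aLoop3_eq (visits : List (List (String × String))) (pre hol : List String)
    (hpre : ∀ s ∈ pre, s ≠ "eid" ∧ s ≠ "ramadan" ∧ s ≠ "national_day") :
    aLoop3 visits (pre ++ hol) = pre ++ holF visits hol := by
  induction visits generalizing hol with
  | nil => simp [aLoop3, holF]
  | cons v rest ih =>
    simp only [aLoop3, holF]
    cases hocc : pvVisitGet? v "occasion" with
    | none => simpa using ih hol
    | some s =>
      by_cases hhol : s = "eid" ∨ s = "ramadan" ∨ s = "national_day"
      · have h1 : ((some s == some "eid" || some s == some "ramadan" ||
            some s == some "national_day") : Bool) = true := by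
          rcases hhol with h | h | h <;> simp [h]
        have h2 : ((s == "eid" || s == "ramadan" || s == "national_day") : Bool) = true := by
          rcases hhol with h | h | h <;> simp [h]
        have hnp : s ∉ pre := fun hm => by
          rcases hpre s hm with ⟨a, b, c⟩
          rcases hhol with h | h | h <;> [exact a h; exact b h; exact c h]
        by_cases hm : s ∈ hol
        · have : s ∈ pre ++ hol := List.mem_append.mpr (Or.inr hm)
          simp [h2, this, hm, ih]
        · have : s ∉ pre ++ hol := by
            intro h; rcases List.mem_append.mp h with h | h
            · exact hnp h
            · exact hm h
          rw [if_pos h1]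
          simp only [if_neg this]
          rw [show pre ++ hol ++ [s] = pre ++ (hol ++ [s]) by simp]
          rw [ih (hol ++ [s])]
          simp [h2, hm]
      · have h1 : ((some s == some "eid" || some s == some "ramadan" ||
            some s == some "national_day") : Bool) = false := by
          simp only [Bool.or_eq_false_iff, beq_eq_false_iff_ne, ne_eq, Option.some.injEq]
          push Not at hhol
          exact ⟨⟨hhol.1, hhol.2.1⟩, hhol.2.2⟩
        have h2 : ((s == "eid" || s == "ramadan" || s == "national_day") : Bool) = false := by
          simp only [Bool.or_eq_false_iff, beq_eq_false_iff_ne, ne_eq]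
          push Not at hhol
          exact ⟨⟨hhol.1, hhol.2.1⟩, hhol.2.2⟩
        simp [h2, ih]

theorem bLoop_eq (visits : List (List (String × String))) (hb ha : Bool) (hol : List String) :
    bLoop visits hb ha hol = (hb || hbF visits, ha || haF visits, holF visits hol) := by
  induction visits generalizing hb ha hol with
  | nil => simp [bLoop, hbF, haF, holF]
  | cons v rest ih =>
    simp only [bLoop, hbF, haF, holF, List.any_cons]
    cases hocc : pvVisitGet? v "occasion" with
    | none => simp [ih, hbF, haF]
    | some s =>
      by_cases hB : s = "birthday"
      · simp [hB, ih, hbF, haF]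
      · by_cases hA : s = "anniversary"
        · simp [hA, ih, hbF, haF]
        · have hb' : ((some s == some "birthday") : Bool) = false := by simp [hB]
          have ha' : ((some s == some "anniversary") : Bool) = false := by simp [hA]
          simp only [hb', ha', Bool.false_eq_true, if_false]
          simp [ih, hbF, haF]
          split <;> rfl

-- ===== VERDICT (by name: the statement is the Claim_ definition above) =====
theorem identify_special_occasions_py_spec : Claim_equal_identify_special_occasions_py := by
  intro cd _
  unfold Spec_identify_special_occasions_py identify_special_occasions_py identify_special_occasions_py_alt
  simp only [bLoop_eq, Bool.false_or]
  rw [aLoop1_eq, aLoop2_eq]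
  have := aLoop3_eq (pvVisitsGetD cd)
    (([] ++ (if hbF (pvVisitsGetD cd) then ["birthday"] else [])) ++
      (if haF (pvVisitsGetD cd) then ["anniversary"] else [])) []
    (by
      intro s hs
      rcases List.mem_append.mp hs with h | h
      · rw [List.nil_append] at h
        split at h <;> simp_all
      · split at h <;> simp_all)
  simpa using this
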